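-- pv_equiv track=rewrite | github.com/ceph/ceph | src/ceph-volume/ceph_volume/devices/lvm/migrate.py | get_target_type_by_source
-- ===== SOURCE A (Python) =====
-- def get_target_type_by_source(devices):
--     ret = None
--     for device, type in devices:
--         if type == 'db':
--             return 'db'
--         elif type == 'wal':
--             ret = 'wal'
--     return ret
-- ===== SOURCE B (Python) =====
-- def get_target_type_by_source(devices):
--     types = {t for _, t in devices}
--     if 'db' in types:
--         return 'db'
--     if 'wal' in types:
--         return 'wal'
--     return None
-- ===== Notes on version B (the rewrite author's own statement) =====
-- stated objective: simpler
-- what changed: Replaces the early-return loop with a wal accumulator by building the set of device types once and doing two preference-ordered membership queries.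
import Mathlib
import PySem

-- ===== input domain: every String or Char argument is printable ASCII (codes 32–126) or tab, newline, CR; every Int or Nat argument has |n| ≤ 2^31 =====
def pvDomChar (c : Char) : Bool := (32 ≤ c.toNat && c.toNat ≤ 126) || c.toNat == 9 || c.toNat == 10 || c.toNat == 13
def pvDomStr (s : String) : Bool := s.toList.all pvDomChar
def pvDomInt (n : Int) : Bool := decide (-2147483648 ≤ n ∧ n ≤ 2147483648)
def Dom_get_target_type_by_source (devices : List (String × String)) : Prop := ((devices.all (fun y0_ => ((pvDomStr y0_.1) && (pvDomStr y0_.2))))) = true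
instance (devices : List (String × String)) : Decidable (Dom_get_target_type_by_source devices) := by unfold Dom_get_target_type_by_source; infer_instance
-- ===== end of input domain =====

-- B builds the set of device types once and queries 'db' then 'wal', replacing A's early-return loop with a 'wal' accumulator (objective: simpler).
-- ===== PORT A =====
def pvGo_get_target_type_by_source : List (String × String) → Option String → Option String
  | [], ret => ret
  | (_, ty) :: rest, ret =>
    if ty = "db" then some "db"
    else if ty = "wal" then pvGo_get_target_type_by_source rest (some "wal")
    else pvGo_get_target_type_by_source rest ret

def get_target_type_by_source (devices : List (String × String)) : Option String :=
  pvGo_get_target_type_by_source devices none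

-- ===== PORT B =====
def get_target_type_by_source_alt (devices : List (String × String)) : Option String :=
  let types := PySem.Set.ofList (devices.map Prod.snd)
  if "db" ∈ types then some "db"
  else if "wal" ∈ types then some "wal"
  else none

-- ===== PRECONDITION & SPEC =====
def Spec_get_target_type_by_source (devices : List (String × String)) (out : Option String) : Prop := out = get_target_type_by_source_alt devices
instance (devices : List (String × String)) (out : Option String) : Decidable (Spec_get_target_type_by_source devices out) := by unfold Spec_get_target_type_by_source; infer_instance

-- ===== CLAIM (what is proved, stated in full; the proofs are below) =====
def Claim_equal_get_target_type_by_source : Prop := ∀ (devices : List (String × String)), Dom_get_target_type_by_source devices → Spec_get_target_type_by_source devices (get_target_type_by_source devices)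

-- ===== LEMMAS AND PROOFS =====
theorem pvGo_characterization (devices : List (String × String)) (ret : Option String) :
    pvGo_get_target_type_by_source devices ret =
      if "db" ∈ devices.map Prod.snd then some "db"
      else if "wal" ∈ devices.map Prod.snd then some "wal"
      else ret := by
  induction devices generalizing ret with
  | nil => simp [pvGo_get_target_type_by_source]
  | cons h t ih =>
    obtain ⟨d, ty⟩ := h
    by_cases hdb : ty = "db"
    · simp [pvGo_get_target_type_by_source, hdb]
    · have hdbm : ("db" ∈ ty :: List.map Prod.snd t) = ("db" ∈ List.map Prod.snd t) := by
        simp [List.mem_cons, Ne.symm hdb]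
      by_cases hwal : ty = "wal"
      · simp only [pvGo_get_target_type_by_source, List.map_cons, if_neg hdb, if_pos hwal,
          ih, hdbm]
        split
        · rfl
        · simp [hwal, List.mem_cons]
      · have hwalm : ("wal" ∈ ty :: List.map Prod.snd t) = ("wal" ∈ List.map Prod.snd t) := by
          simp [List.mem_cons, Ne.symm hwal]
        simp only [pvGo_get_target_type_by_source, List.map_cons, if_neg hdb, if_neg hwal,
          ih, hdbm, hwalm]

-- ===== VERDICT (by name: the statement is the Claim_ definition above) =====
theorem get_target_type_by_source_spec : Claim_equal_get_target_type_by_source := by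
  intro devices _
  unfold Spec_get_target_type_by_source get_target_type_by_source get_target_type_by_source_alt
  simp only [PySem.Set.mem_ofList]
  rw [pvGo_characterization]
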